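-- pv_equiv track=rewrite | github.com/kiwiforword/ZCanPro | 1-TestComm/TestComm.py | CalCrcm32Ex
-- ===== SOURCE A (Python) =====
-- crcm32TableEx = \
-- [
-- 	0x00000000, 0xf26b8303, 0xe13b70f7, 0x1350f3f4, 0xc79a971f, 0x35f1141c, 0x26a1e7e8, 0xd4ca64eb,
-- 	0x8ad958cf, 0x78b2dbcc, 0x6be22838, 0x9989ab3b, 0x4d43cfd0, 0xbf284cd3, 0xac78bf27, 0x5e133c24,
-- 	0x105ec76f, 0xe235446c, 0xf165b798, 0x030e349b, 0xd7c45070, 0x25afd373, 0x36ff2087, 0xc494a384,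
-- 	0x9a879fa0, 0x68ec1ca3, 0x7bbcef57, 0x89d76c54, 0x5d1d08bf, 0xaf768bbc, 0xbc267848, 0x4e4dfb4b,
-- 	0x20bd8ede, 0xd2d60ddd, 0xc186fe29, 0x33ed7d2a, 0xe72719c1, 0x154c9ac2, 0x061c6936, 0xf477ea35,
-- 	0xaa64d611, 0x580f5512, 0x4b5fa6e6, 0xb93425e5, 0x6dfe410e, 0x9f95c20d, 0x8cc531f9, 0x7eaeb2fa,
-- 	0x30e349b1, 0xc288cab2, 0xd1d83946, 0x23b3ba45, 0xf779deae, 0x05125dad, 0x1642ae59, 0xe4292d5a,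
-- 	0xba3a117e, 0x4851927d, 0x5b016189, 0xa96ae28a, 0x7da08661, 0x8fcb0562, 0x9c9bf696, 0x6ef07595,
-- 	0x417b1dbc, 0xb3109ebf, 0xa0406d4b, 0x522bee48, 0x86e18aa3, 0x748a09a0, 0x67dafa54, 0x95b17957,
-- 	0xcba24573, 0x39c9c670, 0x2a993584, 0xd8f2b687, 0x0c38d26c, 0xfe53516f, 0xed03a29b, 0x1f682198,
-- 	0x5125dad3, 0xa34e59d0, 0xb01eaa24, 0x42752927, 0x96bf4dcc, 0x64d4cecf, 0x77843d3b, 0x85efbe38,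
-- 	0xdbfc821c, 0x2997011f, 0x3ac7f2eb, 0xc8ac71e8, 0x1c661503, 0xee0d9600, 0xfd5d65f4, 0x0f36e6f7,
-- 	0x61c69362, 0x93ad1061, 0x80fde395, 0x72966096, 0xa65c047d, 0x5437877e, 0x4767748a, 0xb50cf789,
-- 	0xeb1fcbad, 0x197448ae, 0x0a24bb5a, 0xf84f3859, 0x2c855cb2, 0xdeeedfb1, 0xcdbe2c45, 0x3fd5af46,
-- 	0x7198540d, 0x83f3d70e, 0x90a324fa, 0x62c8a7f9, 0xb602c312, 0x44694011, 0x5739b3e5, 0xa55230e6,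
-- 	0xfb410cc2, 0x092a8fc1, 0x1a7a7c35, 0xe811ff36, 0x3cdb9bdd, 0xceb018de, 0xdde0eb2a, 0x2f8b6829,
-- 	0x82f63b78, 0x709db87b, 0x63cd4b8f, 0x91a6c88c, 0x456cac67, 0xb7072f64, 0xa457dc90, 0x563c5f93,
-- 	0x082f63b7, 0xfa44e0b4, 0xe9141340, 0x1b7f9043, 0xcfb5f4a8, 0x3dde77ab, 0x2e8e845f, 0xdce5075c,
-- 	0x92a8fc17, 0x60c37f14, 0x73938ce0, 0x81f80fe3, 0x55326b08, 0xa759e80b, 0xb4091bff, 0x466298fc,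
-- 	0x1871a4d8, 0xea1a27db, 0xf94ad42f, 0x0b21572c, 0xdfeb33c7, 0x2d80b0c4, 0x3ed04330, 0xccbbc033,
-- 	0xa24bb5a6, 0x502036a5, 0x4370c551, 0xb11b4652, 0x65d122b9, 0x97baa1ba, 0x84ea524e, 0x7681d14d,
-- 	0x2892ed69, 0xdaf96e6a, 0xc9a99d9e, 0x3bc21e9d, 0xef087a76, 0x1d63f975, 0x0e330a81, 0xfc588982,
-- 	0xb21572c9, 0x407ef1ca, 0x532e023e, 0xa145813d, 0x758fe5d6, 0x87e466d5, 0x94b49521, 0x66df1622,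
-- 	0x38cc2a06, 0xcaa7a905, 0xd9f75af1, 0x2b9cd9f2, 0xff56bd19, 0x0d3d3e1a, 0x1e6dcdee, 0xec064eed,
-- 	0xc38d26c4, 0x31e6a5c7, 0x22b65633, 0xd0ddd530, 0x0417b1db, 0xf67c32d8, 0xe52cc12c, 0x1747422f,
-- 	0x49547e0b, 0xbb3ffd08, 0xa86f0efc, 0x5a048dff, 0x8ecee914, 0x7ca56a17, 0x6ff599e3, 0x9d9e1ae0,
-- 	0xd3d3e1ab, 0x21b862a8, 0x32e8915c, 0xc083125f, 0x144976b4, 0xe622f5b7, 0xf5720643, 0x07198540,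
-- 	0x590ab964, 0xab613a67, 0xb831c993, 0x4a5a4a90, 0x9e902e7b, 0x6cfbad78, 0x7fab5e8c, 0x8dc0dd8f,
-- 	0xe330a81a, 0x115b2b19, 0x020bd8ed, 0xf0605bee, 0x24aa3f05, 0xd6c1bc06, 0xc5914ff2, 0x37faccf1,
-- 	0x69e9f0d5, 0x9b8273d6, 0x88d28022, 0x7ab90321, 0xae7367ca, 0x5c18e4c9, 0x4f48173d, 0xbd23943e,
-- 	0xf36e6f75, 0x0105ec76, 0x12551f82, 0xe03e9c81, 0x34f4f86a, 0xc69f7b69, 0xd5cf889d, 0x27a40b9e,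
-- 	0x79b737ba, 0x8bdcb4b9, 0x988c474d, 0x6ae7c44e, 0xbe2da0a5, 0x4c4623a6, 0x5f16d052, 0xad7d5351
-- ]
--
-- def CalCrcm32Ex(datalist, size, initvalue):
--
--     if 1 == size % 2:
--
--         return 0
--     else:
--
--         crc = initvalue
--
--         for index in range(0, size):
--             crc = crcm32TableEx[(crc ^ (datalist[index] & 0xFF)) & 0xFF] ^ (crc >> 8)
--
--     return crc
-- ===== SOURCE B (Python) =====
-- def CalCrcm32Ex(datalist, size, initvalue):
--     # bitwise CRC32C (reflected polynomial 0x82F63B78), no lookup table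
--     if 1 == size % 2:
--         return 0
--     crc = initvalue
--     for index in range(size):
--         crc = crc ^ (datalist[index] & 0xFF)
--         for _ in range(8):
--             crc = (crc >> 1) ^ (0x82F63B78 & -(crc & 1))
--     return crc
-- ===== Notes on version B (the rewrite author's own statement) =====
-- stated objective: simpler
-- what changed: B computes CRC32C bitwise with the reflected polynomial 0x82F63B78 (8 shift/xor rounds per byte) instead of indexing a 256-entry precomputed table, eliminating the table entirely.
import Mathlib
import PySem

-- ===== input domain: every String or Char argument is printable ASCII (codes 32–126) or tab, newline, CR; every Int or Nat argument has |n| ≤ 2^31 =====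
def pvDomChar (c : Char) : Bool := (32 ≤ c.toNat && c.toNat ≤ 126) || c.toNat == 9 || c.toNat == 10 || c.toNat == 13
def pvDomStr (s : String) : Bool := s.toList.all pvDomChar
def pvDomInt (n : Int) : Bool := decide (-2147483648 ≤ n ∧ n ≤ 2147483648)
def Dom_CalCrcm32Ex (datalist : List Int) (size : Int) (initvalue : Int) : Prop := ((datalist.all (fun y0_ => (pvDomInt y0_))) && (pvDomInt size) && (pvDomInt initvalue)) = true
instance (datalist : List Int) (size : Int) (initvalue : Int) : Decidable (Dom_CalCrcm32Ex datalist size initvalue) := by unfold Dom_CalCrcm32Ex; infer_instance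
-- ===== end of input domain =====

-- B replaces the 256-entry lookup table by the bitwise CRC32C update with the
-- reflected polynomial 0x82F63B78 (8 shift/xor rounds per byte): simpler, no table.

-- ===== PORT A =====
def crcm32TableEx : List Int :=
[ 0, 4067132163, 3778769143, 324072436, 3348797215, 904991772, 648144872, 3570033899,
  2329499855, 2024987596, 1809983544, 2575936315, 1296289744, 3207089363, 2893594407, 1578318884,
  274646895, 3795141740, 4049975192, 51262619, 3619967088, 632279923, 922689671, 3298075524,
  2592579488, 1760304291, 2075979607, 2312596564, 1562183871, 2943781820, 3156637768, 1313733451,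
  549293790, 3537243613, 3246849577, 871202090, 3878099393, 357341890, 102525238, 4101499445,
  2858735121, 1477399826, 1264559846, 3107202533, 1845379342, 2677391885, 2361733625, 2125378298,
  820201905, 3263744690, 3520608582, 598981189, 4151959214, 85089709, 373468761, 3827903834,
  3124367742, 1213305469, 1526817161, 2842354314, 2107672161, 2412447074, 2627466902, 1861252501,
  1098587580, 3004210879, 2688576843, 1378610760, 2262928035, 1955203488, 1742404180, 2511436119,
  3416409459, 969524848, 714683780, 3639785095, 205050476, 4266873199, 3976438427, 526918040,
  1361435347, 2739821008, 2954799652, 1114974503, 2529119692, 1691668175, 2005155131, 2247081528,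
  3690758684, 697762079, 986182379, 3366744552, 476452099, 3993867776, 4250756596, 255256311,
  1640403810, 2477592673, 2164122517, 1922457750, 2791048317, 1412925310, 1197962378, 3037525897,
  3944729517, 427051182, 170179418, 4165941337, 746937522, 3740196785, 3451792453, 1070968646,
  1905808397, 2213795598, 2426610938, 1657317369, 3053634322, 1147748369, 1463399397, 2773627110,
  4215344322, 153784257, 444234805, 3893493558, 1021025245, 3467647198, 3722505002, 797665321,
  2197175160, 1889384571, 1674398607, 2443626636, 1164749927, 3070701412, 2757221520, 1446797203,
  137323447, 4198817972, 3910406976, 461344835, 3484808360, 1037989803, 781091935, 3705997148,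
  2460548119, 1623424788, 1939049696, 2180517859, 1429367560, 2807687179, 3020495871, 1180866812,
  410100952, 3927582683, 4182430767, 186734380, 3756733383, 763408580, 1053836080, 3434856499,
  2722870694, 1344288421, 1131464017, 2971354706, 1708204729, 2545590714, 2229949006, 1988219213,
  680717673, 3673779818, 3383336350, 1002577565, 4010310262, 493091189, 238226049, 4233660802,
  2987750089, 1082061258, 1395524158, 2705686845, 1972364758, 2279892693, 2494862625, 1725896226,
  952904198, 3399985413, 3656866545, 731699698, 4283874585, 222117402, 510512622, 3959836397,
  3280807620, 837199303, 582374963, 3504198960, 68661723, 4135334616, 3844915500, 390545967,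
  1230274059, 3141532936, 2825850620, 1510247935, 2395924756, 2091215383, 1878366691, 2644384480,
  3553878443, 565732008, 854102364, 3229815391, 340358836, 3861050807, 4117890627, 119113024,
  1493875044, 2875275879, 3090270611, 1247431312, 2660249211, 1828433272, 2141937292, 2378227087,
  3811616794, 291187481, 34330861, 4032846830, 615137029, 3603020806, 3314634738, 939183345,
  1776939221, 2609017814, 2295496738, 2058945313, 2926798794, 1545135305, 1330124605, 3173225534,
  4084100981, 17165430, 307568514, 3762199681, 888469610, 3332340585, 3587147933, 665062302,
  2042050490, 2346497209, 2559330125, 1793573966, 3190661285, 1279665062, 1595330642, 2910671697 ]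

def CalCrcm32Ex (datalist : List Int) (size : Int) (initvalue : Int) : Int :=
  if (1 : Int) = PySem.Int.mod size 2 then 0
  else
    (PySem.List.pyRange 0 size 1).foldl
      (fun crc index =>
        PySem.Int.bxor
          ((PySem.List.pyGet? crcm32TableEx
              (PySem.Int.band
                (PySem.Int.bxor crc
                  (PySem.Int.band ((PySem.List.pyGet? datalist index).getD 0) 255)) 255)).getD 0)
          (crc >>> (8 : Nat)))
      initvalue

-- ===== PORT B =====
def CalCrcm32Ex_alt (datalist : List Int) (size : Int) (initvalue : Int) : Int :=
  if (1 : Int) = PySem.Int.mod size 2 then 0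
  else
    (PySem.List.pyRange 0 size 1).foldl
      (fun crc index =>
        (PySem.List.pyRange 0 8 1).foldl
          (fun c _ => PySem.Int.bxor (c >>> (1 : Nat)) (PySem.Int.band 2197175160 (-(PySem.Int.band c 1))))
          (PySem.Int.bxor crc (PySem.Int.band ((PySem.List.pyGet? datalist index).getD 0) 255)))
      initvalue

-- ===== PRECONDITION & SPEC =====
-- Pre_ excludes exactly the inputs where Python raises IndexError: even size (Python mod)
-- strictly larger than the length of datalist.
def Pre_CalCrcm32Ex (datalist : List Int) (size : Int) (initvalue : Int) : Prop :=
  PySem.Int.mod size 2 = 1 ∨ size ≤ (datalist.length : Int)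
instance (datalist : List Int) (size : Int) (initvalue : Int) : Decidable (Pre_CalCrcm32Ex datalist size initvalue) := by unfold Pre_CalCrcm32Ex; infer_instance

def pvWitness_CalCrcm32Ex : List Int × Int × Int := ([1, 255, 0, 300], 4, -5)

def Spec_CalCrcm32Ex (datalist : List Int) (size : Int) (initvalue : Int) (out : Int) : Prop := out = CalCrcm32Ex_alt datalist size initvalue
instance (datalist : List Int) (size : Int) (initvalue : Int) (out : Int) : Decidable (Spec_CalCrcm32Ex datalist size initvalue out) := by unfold Spec_CalCrcm32Ex; infer_instance

-- ===== CLAIM (what is proved, stated in full; the proofs are below) =====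
def Claim_equal_CalCrcm32Ex : Prop := ∀ (datalist : List Int) (size : Int) (initvalue : Int), Dom_CalCrcm32Ex datalist size initvalue → Pre_CalCrcm32Ex datalist size initvalue → Spec_CalCrcm32Ex datalist size initvalue (CalCrcm32Ex datalist size initvalue)

-- ===== LEMMAS AND PROOFS =====

-- one bitwise CRC round, as written in B's inner loop
def pvRound (c : Int) : Int :=
  PySem.Int.bxor (c >>> (1 : Nat)) (PySem.Int.band 2197175160 (-(PySem.Int.band c 1)))

def pvRounds : Nat → Int → Int
  | 0, c => c
  | n + 1, c => pvRounds n (pvRound c)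

-- table lookup as A performs it
def pvTbl (i : Int) : Int := (PySem.List.pyGet? crcm32TableEx i).getD 0

-- constructor equations for PySem.Int.bxor
theorem bxor_ofNat_ofNat (m n : Nat) :
    PySem.Int.bxor (Int.ofNat m) (Int.ofNat n) = Int.ofNat (m ^^^ n) := by
  simp [PySem.Int.bxor]

theorem bxor_ofNat_negSucc (m n : Nat) :
    PySem.Int.bxor (Int.ofNat m) (Int.negSucc n) = Int.negSucc (m ^^^ n) := by
  simp [PySem.Int.bxor, Int.negSucc_eq]
  omega

theorem bxor_negSucc_ofNat (m n : Nat) :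
    PySem.Int.bxor (Int.negSucc m) (Int.ofNat n) = Int.negSucc (m ^^^ n) := by
  simp [PySem.Int.bxor, Int.negSucc_eq]
  omega

theorem bxor_negSucc_negSucc (m n : Nat) :
    PySem.Int.bxor (Int.negSucc m) (Int.negSucc n) = Int.ofNat (m ^^^ n) := by
  simp [PySem.Int.bxor, Int.negSucc_eq]
  omega

theorem band_ofNat_255 (m : Nat) :
    PySem.Int.band (Int.ofNat m) 255 = Int.ofNat (m % 256) := by
  have h : m &&& 255 = m % 256 := by
    simpa using Nat.and_two_pow_sub_one_eq_mod m 8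
  simp [PySem.Int.band, h]

theorem band_negSucc_255 (m : Nat) :
    PySem.Int.band (Int.negSucc m) 255 = Int.ofNat (255 - m % 256) := by
  have h : 255 &&& m = m % 256 := by
    rw [Nat.and_comm]
    simpa using Nat.and_two_pow_sub_one_eq_mod m 8
  simp [PySem.Int.band, Int.negSucc_eq, h]
  omega

theorem band_255_bounds (c : Int) : 0 ≤ PySem.Int.band c 255 ∧ PySem.Int.band c 255 < 256 := by
  cases c with
  | ofNat m =>
    rw [band_ofNat_255, Int.ofNat_eq_natCast]
    have := Nat.mod_lt m (y := 256) (by norm_num)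
    omega
  | negSucc m =>
    rw [band_negSucc_255, Int.ofNat_eq_natCast]
    omega

-- xor commutes with arithmetic right shift
theorem bxor_shiftRight (a b : Int) (n : Nat) :
    (PySem.Int.bxor a b) >>> n = PySem.Int.bxor (a >>> n) (b >>> n) := by
  have hN : ∀ x y : Nat, (x ^^^ y) >>> n = x >>> n ^^^ y >>> n := by
    intro x y
    simp [Nat.shiftRight_eq_div_pow, Nat.xor_div_two_pow]
  have hOf : ∀ x : Nat, (Int.ofNat x) >>> n = Int.ofNat (x >>> n) := fun _ => rfl
  have hNeg : ∀ x : Nat, (Int.negSucc x) >>> n = Int.negSucc (x >>> n) := fun _ => rfl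
  cases a with
  | ofNat m =>
    cases b with
    | ofNat n => rw [bxor_ofNat_ofNat, hOf, hOf, hOf, bxor_ofNat_ofNat, hN]
    | negSucc n => rw [bxor_ofNat_negSucc, hNeg, hOf, hNeg, bxor_ofNat_negSucc, hN]
  | negSucc m =>
    cases b with
    | ofNat n => rw [bxor_negSucc_ofNat, hNeg, hNeg, hOf, bxor_negSucc_ofNat, hN]
    | negSucc n => rw [bxor_negSucc_negSucc, hOf, hNeg, hNeg, bxor_negSucc_negSucc, hN]

theorem bxor_assoc' (a b c : Int) :
    PySem.Int.bxor (PySem.Int.bxor a b) c = PySem.Int.bxor a (PySem.Int.bxor b c) := by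
  cases a <;> cases b <;> cases c <;>
    simp only [bxor_ofNat_ofNat, bxor_ofNat_negSucc, bxor_negSucc_ofNat, bxor_negSucc_negSucc,
      Nat.xor_assoc]

theorem bxor_emod_two (a b : Int) (ha : a % 2 = 0) :
    (PySem.Int.bxor a b) % 2 = b % 2 := by
  have key : ∀ x y : Nat, (x ^^^ y) % 2 = (x % 2 + y % 2) % 2 := by
    intro x y
    have h2 : (x ^^^ y) % 2 = x % 2 ^^^ y % 2 := by
      simpa using Nat.xor_mod_two_pow (a := x) (b := y) (n := 1)
    rcases Nat.mod_two_eq_zero_or_one x with hx | hx <;>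
      rcases Nat.mod_two_eq_zero_or_one y with hy | hy <;>
        rw [hx, hy] at h2 ⊢ <;> simpa using h2
  cases a with
  | ofNat m =>
    cases b with
    | ofNat n =>
      have hk := key m n
      rw [bxor_ofNat_ofNat]
      rw [Int.ofNat_eq_natCast] at ha
      simp only [Int.ofNat_eq_natCast]
      omega
    | negSucc n =>
      have hk := key m n
      rw [bxor_ofNat_negSucc, Int.negSucc_eq, Int.negSucc_eq]
      rw [Int.ofNat_eq_natCast] at ha
      omega
  | negSucc m =>
    cases b with
    | ofNat n =>
      have hk := key m n
      rw [bxor_negSucc_ofNat, Int.negSucc_eq]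
      rw [Int.negSucc_eq] at ha
      simp only [Int.ofNat_eq_natCast]
      omega
    | negSucc n =>
      have hk := key m n
      rw [bxor_negSucc_negSucc, Int.ofNat_eq_natCast]
      rw [Int.negSucc_eq] at ha
      rw [Int.negSucc_eq]
      omega

theorem round_if (c : Int) :
    pvRound c = if c % 2 = 1 then PySem.Int.bxor (c >>> (1 : Nat)) 2197175160 else c >>> (1 : Nat) := by
  unfold pvRound
  rw [PySem.Int.band_one, PySem.Int.mod_eq_emod_of_pos (by norm_num)]
  by_cases h : c % 2 = 1
  · rw [if_pos h, h]
    norm_num [PySem.Int.band_neg_one]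
  · have h0 : c % 2 = 0 := by omega
    rw [if_neg h, h0]
    norm_num [PySem.Int.band_zero, PySem.Int.bxor_zero]

-- a round on (even x) ^ g splits
theorem round_split (x g : Int) (hx : x % 2 = 0) :
    pvRound (PySem.Int.bxor x g) = PySem.Int.bxor (x >>> (1 : Nat)) (pvRound g) := by
  rw [round_if, round_if, bxor_emod_two x g hx]
  by_cases hg : g % 2 = 1
  · rw [if_pos hg, if_pos hg, bxor_shiftRight, bxor_assoc']
  · rw [if_neg hg, if_neg hg, bxor_shiftRight]

-- n rounds on (h * 2^n) ^ g split
theorem rounds_split (n : Nat) (h g : Int) :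
    pvRounds n (PySem.Int.bxor (h * 2 ^ n) g) = PySem.Int.bxor h (pvRounds n g) := by
  induction n generalizing g with
  | zero => simp [pvRounds]
  | succ n ih =>
    show pvRounds n (pvRound (PySem.Int.bxor (h * 2 ^ (n + 1)) g)) = PySem.Int.bxor h (pvRounds n (pvRound g))
    have hmul : h * 2 ^ (n + 1) = h * 2 ^ n * 2 := by ring
    have hx : (h * 2 ^ (n + 1)) % 2 = 0 := by rw [hmul]; exact Int.mul_emod_left _ _
    have hsh : (h * 2 ^ (n + 1)) >>> (1 : Nat) = h * 2 ^ n := by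
      rw [Int.shiftRight_eq_div_pow, hmul]
      norm_num
    rw [round_split _ _ hx, hsh, ih]

-- any integer decomposes as (c >> 8) * 256 xor (c & 255)
set_option maxRecDepth 8192 in
theorem byte_decomp (c : Int) :
    PySem.Int.bxor ((c >>> (8 : Nat)) * 2 ^ 8) (PySem.Int.band c 255) = c := by
  cases c with
  | ofNat m =>
    rw [show ((Int.ofNat m) >>> (8 : Nat)) = Int.ofNat (m >>> 8) from rfl, band_ofNat_255,
      show ((2 : Int) ^ 8) = Int.ofNat (2 ^ 8) from rfl,
      show Int.ofNat (m >>> 8) * Int.ofNat (2 ^ 8) = Int.ofNat ((m >>> 8) * 2 ^ 8) from rfl,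
      bxor_ofNat_ofNat, Nat.mul_comm]
    congr 1
    apply Nat.eq_of_testBit_eq
    intro i
    rw [Nat.testBit_xor, show (2 ^ 8 * (m >>> 8) : Nat) = 2 ^ 8 * (m >>> 8) + 0 from rfl,
      Nat.testBit_two_pow_mul_add _ (by norm_num) i,
      show (256 : Nat) = 2 ^ 8 from rfl, Nat.testBit_mod_two_pow]
    by_cases h8 : i < 8
    · simp [h8]
    · simp [h8, Nat.testBit_shiftRight, show 8 + (i - 8) = i from by omega]
  | negSucc m =>
    rw [show ((Int.negSucc m) >>> (8 : Nat)) = Int.negSucc (m >>> 8) from rfl, band_negSucc_255,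
      show (Int.negSucc (m >>> 8)) * (2 : Int) ^ 8 = Int.negSucc (2 ^ 8 * (m >>> 8) + 255) from by
        rw [Int.negSucc_eq, Int.negSucc_eq]; push_cast; ring,
      bxor_negSucc_ofNat]
    congr 1
    have hc : 255 - m % 256 = 255 ^^^ m % 256 := by
      have hlt : m % 256 < 256 := Nat.mod_lt m (by norm_num)
      revert hlt
      generalize m % 256 = r
      revert r
      decide
    rw [hc]
    apply Nat.eq_of_testBit_eq
    intro i
    rw [Nat.testBit_xor, Nat.testBit_two_pow_mul_add _ (by norm_num) i, Nat.testBit_xor,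
      show (256 : Nat) = 2 ^ 8 from rfl, Nat.testBit_mod_two_pow,
      show (255 : Nat) = 2 ^ 8 - 1 from rfl, Nat.testBit_two_pow_sub_one]
    by_cases h8 : i < 8
    · simp [h8]
    · simp [h8, Nat.testBit_shiftRight, show 8 + (i - 8) = i from by omega]

-- the table IS eight bitwise rounds, on each byte value
set_option maxRecDepth 8192 in
theorem table_rounds : ∀ r : Nat, r < 256 → pvRounds 8 (Int.ofNat r) = pvTbl (Int.ofNat r) := by
  decide

-- eight bitwise rounds = table lookup ^ (c >> 8)
theorem step_rounds (c : Int) :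
    pvRounds 8 c = PySem.Int.bxor (pvTbl (PySem.Int.band c 255)) (c >>> (8 : Nat)) := by
  obtain ⟨h0, hlt⟩ := band_255_bounds c
  calc pvRounds 8 c
      = pvRounds 8 (PySem.Int.bxor ((c >>> (8 : Nat)) * 2 ^ 8) (PySem.Int.band c 255)) := by
        rw [byte_decomp]
    _ = PySem.Int.bxor (c >>> (8 : Nat)) (pvRounds 8 (PySem.Int.band c 255)) := rounds_split 8 _ _
    _ = PySem.Int.bxor (c >>> (8 : Nat)) (pvTbl (PySem.Int.band c 255)) := by
        cases hb : PySem.Int.band c 255 with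
        | ofNat r =>
          rw [table_rounds r (by rw [hb, Int.ofNat_eq_natCast] at hlt; exact_mod_cast hlt)]
        | negSucc r => rw [hb] at h0; exact absurd h0 (by simp)
    _ = PySem.Int.bxor (pvTbl (PySem.Int.band c 255)) (c >>> (8 : Nat)) := PySem.Int.bxor_comm _ _

theorem step_eq (crc d : Int) :
    PySem.Int.bxor (pvTbl (PySem.Int.band (PySem.Int.bxor crc (PySem.Int.band d 255)) 255)) (crc >>> (8 : Nat))
      = pvRounds 8 (PySem.Int.bxor crc (PySem.Int.band d 255)) := by
  obtain ⟨h0, hlt⟩ := band_255_bounds d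
  have hz : (PySem.Int.band d 255) >>> (8 : Nat) = 0 := by
    cases hb : PySem.Int.band d 255 with
    | ofNat r =>
      rw [show ((Int.ofNat r) >>> (8 : Nat)) = Int.ofNat (r >>> 8) from rfl,
        Nat.shiftRight_eq_div_pow, Nat.div_eq_of_lt (by rw [hb, Int.ofNat_eq_natCast] at hlt; exact_mod_cast hlt)]
      rfl
    | negSucc r => rw [hb] at h0; exact absurd h0 (by simp)
  rw [step_rounds, bxor_shiftRight, hz, PySem.Int.bxor_zero]

theorem fold8_eq (c : Int) :
    (PySem.List.pyRange 0 8 1).foldl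
        (fun c _ => PySem.Int.bxor (c >>> (1 : Nat)) (PySem.Int.band 2197175160 (-(PySem.Int.band c 1)))) c
      = pvRounds 8 c := by
  rw [show PySem.List.pyRange 0 8 1 = [0, 1, 2, 3, 4, 5, 6, 7] from by decide]
  rfl

-- ===== VERDICT (by name: the statement is the Claim_ definition above) =====
theorem CalCrcm32Ex_spec : Claim_equal_CalCrcm32Ex := by
  intro datalist size initvalue _ _
  unfold Spec_CalCrcm32Ex CalCrcm32Ex CalCrcm32Ex_alt
  split
  · rfl
  · have hf :
        (fun (crc index : Int) =>
          PySem.Int.bxor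
            ((PySem.List.pyGet? crcm32TableEx
                (PySem.Int.band
                  (PySem.Int.bxor crc
                    (PySem.Int.band ((PySem.List.pyGet? datalist index).getD 0) 255)) 255)).getD 0)
            (crc >>> (8 : Nat)))
        = (fun (crc index : Int) =>
            (PySem.List.pyRange 0 8 1).foldl
              (fun c _ => PySem.Int.bxor (c >>> (1 : Nat)) (PySem.Int.band 2197175160 (-(PySem.Int.band c 1))))
              (PySem.Int.bxor crc (PySem.Int.band ((PySem.List.pyGet? datalist index).getD 0) 255))) :=
      funext fun crc => funext fun index => by
        rw [fold8_eq]; exact step_eq crc ((PySem.List.pyGet? datalist index).getD 0)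
    rw [hf]
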